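-- pv_equiv track=rewrite | github.com/andrew250402/FlipRedact | data/date.py | label_date
-- ===== SOURCE A (Python) =====
-- def label_date(text):
--     """Create label sequence for the text. Only mark DATE tokens as B/I-DATE."""
--     tokens = text.split()
--     labels = []
--     prev_was_date = False
--
--     for t in tokens:
--         if any(c.isdigit() for c in t) or any(month in t.lower() for month in
--                                              ["jan","feb","mar","apr","may","jun","jul","aug","sep","oct","nov","dec"]):
--             if prev_was_date:
--                 labels.append("I-DATE")
--             else:
--                 labels.append("B-DATE")
--                 prev_was_date = True
--         else:
--             labels.append("O")
--             prev_was_date = False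
--
--     return " ".join(labels)
-- ===== SOURCE B (Python) =====
-- def label_date(text):
--     """Create label sequence for the text. Only mark DATE tokens as B/I-DATE."""
--     MONTHS = ["jan","feb","mar","apr","may","jun","jul","aug","sep","oct","nov","dec"]
--
--     def is_date(t):
--         return any(c.isdigit() for c in t) or any(m in t.lower() for m in MONTHS)
--
--     tokens = text.split()
--     n = len(tokens)
--     labels = []
--     i = 0
--     while i < n:
--         if is_date(tokens[i]):
--             # consume the whole maximal run of date tokens at once
--             j = i + 1
--             while j < n and is_date(tokens[j]):
--                 j += 1
--             labels += ["B-DATE"] + ["I-DATE"] * (j - i - 1)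
--             i = j
--         else:
--             labels.append("O")
--             i += 1
--     return " ".join(labels)
-- ===== Notes on version B (the rewrite author's own statement) =====
-- stated objective: alternative
-- what changed: B labels by maximal-run extraction: it finds each maximal consecutive run of date tokens and emits B-DATE plus a block of replicated I-DATE labels for the whole run at once, instead of A's per-token loop threading a prev_was_date flag.
import Mathlib
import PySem

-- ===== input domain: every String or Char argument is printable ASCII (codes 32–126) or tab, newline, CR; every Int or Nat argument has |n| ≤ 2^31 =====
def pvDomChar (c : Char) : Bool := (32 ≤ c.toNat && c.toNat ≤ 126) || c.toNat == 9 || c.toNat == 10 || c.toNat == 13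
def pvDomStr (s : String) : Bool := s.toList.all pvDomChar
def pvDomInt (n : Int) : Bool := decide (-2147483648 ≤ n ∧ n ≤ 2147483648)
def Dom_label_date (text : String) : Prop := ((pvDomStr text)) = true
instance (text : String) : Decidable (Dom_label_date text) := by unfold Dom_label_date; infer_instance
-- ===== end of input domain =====

-- B labels by maximal-run extraction (B-DATE + replicated I-DATE per run of date
-- tokens) instead of A's per-token loop threading a prev_was_date flag (alternative decomposition).

-- ===== PORT A =====
def pvMonths : List String :=
  ["jan","feb","mar","apr","may","jun","jul","aug","sep","oct","nov","dec"]

-- the per-token condition of the if: any digit char, or any month substring of t.lower()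
def pvIsDateTok (t : String) : Bool :=
  t.toList.any PySem.Chars.isdigit || pvMonths.any (fun m => PySem.Str.isIn m (PySem.Str.lower t))

def label_date (text : String) : String :=
  let tokens := PySem.Str.split₀ text
  let st := tokens.foldl (fun (st : List String × Bool) t =>
    if pvIsDateTok t then
      if st.2 then (st.1 ++ ["I-DATE"], st.2)
      else (st.1 ++ ["B-DATE"], true)
    else (st.1 ++ ["O"], false)) ([], false)
  PySem.Str.join " " st.1

-- ===== PORT B =====
-- Source B's outer while loop; its inner 'while j < n and is_date' run scan is the
-- takeWhile/dropWhile split of the remainder, the (j-i-1) replication is the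
-- List.replicate over the run length.
def pvEmit : List String → List String
  | [] => []
  | t :: ts =>
    if pvIsDateTok t then
      "B-DATE" :: List.replicate (ts.takeWhile pvIsDateTok).length "I-DATE"
        ++ pvEmit (ts.dropWhile pvIsDateTok)
    else "O" :: pvEmit ts
termination_by ts => ts.length
decreasing_by
  · simp only [List.length_cons]; have := List.length_dropWhile_le (p := pvIsDateTok) (l := ts); omega
  · exact Nat.lt_succ_self _

def label_date_alt (text : String) : String :=
  PySem.Str.join " " (pvEmit (PySem.Str.split₀ text))

-- ===== PRECONDITION & SPEC =====
def Spec_label_date (text : String) (out : String) : Prop := out = label_date_alt text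
instance (text : String) (out : String) : Decidable (Spec_label_date text out) := by unfold Spec_label_date; infer_instance

-- ===== CLAIM (what is proved, stated in full; the proofs are below) =====
def Claim_equal_label_date : Prop := ∀ (text : String), Dom_label_date text → Spec_label_date text (label_date text)

-- ===== LEMMAS AND PROOFS =====

-- A's label sequence as a simple recursion over the tokens, threading the previous flag
def pvGen : List String → Bool → List String
  | [], _ => []
  | t :: ts, p =>
      (if pvIsDateTok t then (if p then "I-DATE" else "B-DATE") else "O") :: pvGen ts (pvIsDateTok t)

theorem pvFoldl_gen (ts : List String) (acc : List String) (p : Bool) :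
    (ts.foldl (fun (st : List String × Bool) t =>
      if pvIsDateTok t then
        if st.2 then (st.1 ++ ["I-DATE"], st.2)
        else (st.1 ++ ["B-DATE"], true)
      else (st.1 ++ ["O"], false)) (acc, p)).1 = acc ++ pvGen ts p := by
  induction ts generalizing acc p with
  | nil => simp [pvGen]
  | cons t ts ih =>
      simp only [List.foldl, pvGen]
      cases hd : pvIsDateTok t <;> cases p <;> simp [ih]

-- with the flag set, A emits I-DATE for the whole leading run of date tokens,
-- then continues from the rest with the flag clear
theorem pvGen_true (ts : List String) :
    pvGen ts true
      = List.replicate (ts.takeWhile pvIsDateTok).length "I-DATE"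
        ++ pvGen (ts.dropWhile pvIsDateTok) false := by
  induction ts with
  | nil => rfl
  | cons t ts ih =>
      cases hd : pvIsDateTok t with
      | true => simp [pvGen, hd, ih, List.replicate_succ]
      | false => simp [pvGen, hd]

theorem pvEmit_eq_gen (ts : List String) : pvEmit ts = pvGen ts false := by
  induction ts using pvEmit.induct with
  | case1 => rw [pvEmit]; rfl
  | case2 t ts hd ih => rw [pvEmit]; simp [hd, pvGen, pvGen_true, ih]
  | case3 t ts hd ih => rw [pvEmit]; simp [hd, pvGen, ih]

-- ===== VERDICT (by name: the statement is the Claim_ definition above) =====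
theorem label_date_spec : Claim_equal_label_date := by
  intro text _
  unfold Spec_label_date label_date label_date_alt
  simp [pvFoldl_gen, pvEmit_eq_gen]
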